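-- pv_equiv track=rewrite | github.com/oksanaust/AlgorithmDZ | lesson7/dz7_3.py | med_arr
-- ===== SOURCE A (Python) =====
-- def med_arr(arr):
--     for i in range(len(arr) - 1):
--         left = 0
--         right = 0
--         equal = 0
--         for j in range(len(arr)):
--             if i != j:
--                 if arr[i] > arr[j]:
--                     left += 1
--                 elif arr[i] < arr[j]:
--                     right += 1
--                 elif arr[i] == arr[j]:
--                     equal += 1
--         if left == right:
--             return arr[i]
-- ===== SOURCE B (Python) =====
-- def med_arr(arr):
--     n = len(arr)
--     cnt = {}
--     for v in arr:
--         cnt[v] = cnt.get(v, 0) + 1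
--     ok = set()
--     less = 0
--     for k in sorted(set(arr)):
--         c = cnt[k]
--         if less == n - less - c:
--             ok.add(k)
--         less += c
--     for v in arr:
--         if v in ok:
--             return v
--     return None
-- ===== Notes on version B (the rewrite author's own statement) =====
-- stated objective: faster
-- what changed: A recounts smaller/larger elements with a nested scan for every index (never looking at the last index); B counts each value once into a dict, sorts the distinct values, derives the balanced values by a prefix-sum sweep, and returns the first element of arr in that set.
-- intended difference: On inputs whose last element is the only one with equally many smaller and larger elements (including every singleton), A's 'range(len(arr)-1)' stops short and returns None, while B returns that last element, which is the intended first-balanced-element answer. — e.g. on med_arr([3, 1, 2]): A returns none, B returns some 2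
import Mathlib
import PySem

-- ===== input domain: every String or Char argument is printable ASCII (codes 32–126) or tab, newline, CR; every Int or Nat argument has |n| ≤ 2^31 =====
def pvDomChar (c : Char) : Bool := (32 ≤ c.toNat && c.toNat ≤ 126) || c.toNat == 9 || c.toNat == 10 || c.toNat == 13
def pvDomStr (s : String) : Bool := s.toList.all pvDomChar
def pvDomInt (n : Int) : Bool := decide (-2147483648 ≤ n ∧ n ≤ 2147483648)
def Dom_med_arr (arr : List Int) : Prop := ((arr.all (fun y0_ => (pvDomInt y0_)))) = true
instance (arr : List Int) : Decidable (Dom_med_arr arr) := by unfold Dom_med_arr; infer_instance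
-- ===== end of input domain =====

-- B replaces A's quadratic per-index counting with one sort plus prefix-count sums over the
-- distinct values (objective: faster); B also considers the last element, which A's
-- 'range(len(arr)-1)' skips — see D_med_arr below.

-- ===== PORT A =====
def medAStep (arr : List Int) (i : Int) (acc : Int × Int × Int) (j : Int) : Int × Int × Int :=
  if i ≠ j then
    if PySem.List.pyGetD arr i 0 > PySem.List.pyGetD arr j 0 then (acc.1 + 1, acc.2.1, acc.2.2)
    else if PySem.List.pyGetD arr i 0 < PySem.List.pyGetD arr j 0 then (acc.1, acc.2.1 + 1, acc.2.2)
    else (acc.1, acc.2.1, acc.2.2 + 1)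
  else acc

def medAGo (arr : List Int) : List Int → Option Int
  | [] => none
  | i :: is =>
    let t := (PySem.List.pyRange 0 (arr.length : Int) 1).foldl (medAStep arr i) (0, 0, 0)
    if t.1 = t.2.1 then some (PySem.List.pyGetD arr i 0) else medAGo arr is

def med_arr (arr : List Int) : Option Int :=
  medAGo arr (PySem.List.pyRange 0 ((arr.length : Int) - 1) 1)

-- ===== PORT B =====
def medBScan (ok : PySem.Set Int) : List Int → Option Int
  | [] => none
  | v :: vs => if PySem.Set.contains ok v then some v else medBScan ok vs

def med_arr_alt (arr : List Int) : Option Int :=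
  let n : Int := (arr.length : Int)
  let cnt := arr.foldl (fun d v => d.insert v (d.getD v 0 + 1)) PySem.Dict.empty
  let p := (PySem.List.sorted (PySem.Set.ofList arr) (fun x => x) false).foldl
      (fun (acc : PySem.Set Int × Int) k =>
        let c := cnt.getD k 0
        if acc.2 = n - acc.2 - c then (PySem.Set.add acc.1 k, acc.2 + c) else (acc.1, acc.2 + c))
      (PySem.Set.empty, 0)
  medBScan p.1 arr

-- ===== PRECONDITION & SPEC =====
-- 'balanced': as many strictly smaller as strictly larger elements of arr
def pvBal (arr : List Int) (v : Int) : Bool :=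
  decide (arr.countP (fun x => decide (x < v)) = arr.countP (fun x => decide (v < x)))

-- A's loop 'range(len(arr)-1)' never examines the LAST element: on inputs where the last
-- element is the only balanced candidate (including every singleton), A returns None while
-- B returns that element, which is the intended first-balanced-element answer.
def D_med_arr (arr : List Int) : Prop :=
  arr ≠ [] ∧ (∀ v ∈ arr.dropLast, pvBal arr v = false) ∧ pvBal arr ((arr.getLast?).getD 0) = true
instance (arr : List Int) : Decidable (D_med_arr arr) := by unfold D_med_arr; infer_instance

def Spec_med_arr (arr : List Int) (out : Option Int) : Prop := ¬ D_med_arr arr → out = med_arr_alt arr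
instance (arr : List Int) (out : Option Int) : Decidable (Spec_med_arr arr out) := by unfold Spec_med_arr; infer_instance

def pvDiffWitness_med_arr : List Int := [3, 1, 2]
def pvDiffWitnessOut_med_arr : (Option Int) × (Option Int) := (none, some 2)

-- ===== CLAIM (what is proved, stated in full; the proofs are below) =====
def Claim_unchanged_med_arr : Prop := ∀ (arr : List Int), Dom_med_arr arr → Spec_med_arr arr (med_arr arr)
def Claim_changed_med_arr : Prop := Dom_med_arr (pvDiffWitness_med_arr) ∧ D_med_arr (pvDiffWitness_med_arr) ∧ med_arr (pvDiffWitness_med_arr) = pvDiffWitnessOut_med_arr.1 ∧ med_arr_alt (pvDiffWitness_med_arr) = pvDiffWitnessOut_med_arr.2 ∧ pvDiffWitnessOut_med_arr.1 ≠ pvDiffWitnessOut_med_arr.2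
def Claim_exact_med_arr : Prop := ∀ (arr : List Int), Dom_med_arr arr → D_med_arr arr → med_arr arr ≠ med_arr_alt arr

-- ===== LEMMAS AND PROOFS =====

theorem pv_tricho (l : List Int) (k : Int) :
    l.length = l.countP (fun x => decide (x < k)) + l.count k + l.countP (fun x => decide (k < x)) := by
  induction l with
  | nil => simp
  | cons a t ih =>
    simp only [List.length_cons, List.count_cons, List.countP_cons, ih]
    rcases lt_trichotomy a k with h | h | h
    · simp [h, not_lt.mpr h.le, h.ne]; omega
    · simp [h]; omega
    · simp [h, not_lt.mpr h.le, h.ne']; omega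
theorem pv_le_split (l : List Int) (k : Int) :
    l.countP (fun x => decide (x ≤ k)) = l.countP (fun x => decide (x < k)) + l.count k := by
  induction l with
  | nil => simp
  | cons a t ih =>
    simp only [List.count_cons, List.countP_cons, ih]
    rcases lt_trichotomy a k with h | h | h
    · simp [h, h.le, h.ne]; omega
    · simp [h]; omega
    · simp [not_lt.mpr h.le, not_le.mpr h, h.ne']

theorem fold_pair (arr : List Int) (i : Int) (js : List Int) (l r e : Int) :
    (js.foldl (medAStep arr i) (l, r, e)).1
      = l + (((js.map (fun j => PySem.List.pyGetD arr j 0)).countP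
          (fun x => decide (x < PySem.List.pyGetD arr i 0)) : Int))
  ∧ (js.foldl (medAStep arr i) (l, r, e)).2.1
      = r + (((js.map (fun j => PySem.List.pyGetD arr j 0)).countP
          (fun x => decide (PySem.List.pyGetD arr i 0 < x)) : Int)) := by
  induction js generalizing l r e with
  | nil => simp
  | cons j js ih =>
    simp only [List.foldl_cons, List.map_cons, List.countP_cons, medAStep]
    by_cases hij : i = j
    · subst hij
      simp [ih]
    · simp only [ne_eq, hij, not_false_iff, if_true]
      rcases lt_trichotomy (PySem.List.pyGetD arr i 0) (PySem.List.pyGetD arr j 0) with h | h | h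
      · simp [not_lt.mpr h.le, h, ih]; ring
      · simp [h, ih]
      · simp [h, not_lt.mpr h.le, ih]; ring

theorem medAGo_eq (arr : List Int) (js : List Int) :
    medAGo arr js = (js.map (fun j => PySem.List.pyGetD arr j 0)).find? (pvBal arr) := by
  induction js with
  | nil => rfl
  | cons i is ih =>
    simp only [medAGo, List.map_cons, List.find?_cons]
    have h1 := fold_pair arr i (PySem.List.pyRange 0 (arr.length : Int) 1) 0 0 0
    have hmap : (PySem.List.pyRange 0 (arr.length : Int) 1).map (fun j => PySem.List.pyGetD arr j 0) = arr := by
      exact PySem.List.map_pyGetD_pyRange_zero' arr 0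
    rw [hmap] at h1
    have hcond : ((PySem.List.pyRange 0 (arr.length : Int) 1).foldl (medAStep arr i) (0, 0, 0)).1
        = ((PySem.List.pyRange 0 (arr.length : Int) 1).foldl (medAStep arr i) (0, 0, 0)).2.1
        ↔ pvBal arr (PySem.List.pyGetD arr i 0) = true := by
      rw [h1.1, h1.2, pvBal]
      simp only [zero_add, decide_eq_true_eq]
      omega
    by_cases hb : pvBal arr (PySem.List.pyGetD arr i 0) = true
    · simp [hcond.mpr hb, hb]
    · have : ¬ _ := fun h => hb (hcond.mp h)
      simp only [this, if_false, ih]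
      simp [Bool.not_eq_true] at hb
      simp [hb]

theorem take_map_range (arr : List Int) (m : Nat) (h : m ≤ arr.length) :
    (List.range m).map (fun k => arr.getD k 0) = arr.take m := by
  apply List.ext_getElem
  · simp [h]
  · intro k h1 h2
    simp at h1 ⊢
    rw [List.getElem?_eq_getElem (by omega), Option.getD_some]

theorem A_char (arr : List Int) : med_arr arr = (arr.dropLast).find? (pvBal arr) := by
  rw [med_arr, medAGo_eq]
  congr 1
  rw [PySem.List.pyRange_one]
  simp only [List.map_map]
  have : ((arr.length : Int) - 1 - 0).toNat = arr.length - 1 := by omega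
  rw [this, List.dropLast_eq_take]
  rw [← take_map_range arr (arr.length - 1) (by omega)]
  apply List.map_congr_left
  intro k hk
  simp [PySem.List.pyGetD_natCast]

theorem ok_fold (arr : List Int) (cnt : PySem.Dict Int Int)
    (hcnt : ∀ k, cnt.getD k 0 = (arr.count k : Int)) :
    ∀ (ks : List Int) (ok : PySem.Set Int) (less : Int),
    ks.Pairwise (· < ·) →
    (∀ x ∈ arr, x ∉ ks → ∀ k ∈ ks, x < k) →
    less = (arr.countP (fun x => decide (x ∉ ks)) : Int) →
    ∀ v, v ∈ (ks.foldl
      (fun (acc : PySem.Set Int × Int) k =>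
        let c := cnt.getD k 0
        if acc.2 = (arr.length : Int) - acc.2 - c then (PySem.Set.add acc.1 k, acc.2 + c) else (acc.1, acc.2 + c))
      (ok, less)).1 ↔ v ∈ ok ∨ (v ∈ ks ∧ pvBal arr v = true) := by
  intro ks
  induction ks with
  | nil => intro ok less _ _ _ v; simp
  | cons k ks ih =>
    intro ok less hpw hcov hless v
    have hpw' := (List.pairwise_cons.mp hpw).2
    have hkts := (List.pairwise_cons.mp hpw).1
    -- less = count of elements < k
    have hlk : less = (arr.countP (fun x => decide (x < k)) : Int) := by
      rw [hless]
      congr 1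
      apply List.countP_congr
      intro x hx
      simp only [decide_eq_true_eq, List.mem_cons, not_or]
      constructor
      · intro ⟨h1, h2⟩
        exact hcov x hx (by simp [h1, h2]) k (List.mem_cons_self)
      · intro hxk
        exact ⟨fun he => absurd he (by omega), fun hm => absurd (hkts x hm) (by omega)⟩
    -- the new accumulator value
    have hlc : less + cnt.getD k 0 = (arr.countP (fun x => decide (x ∉ ks)) : Int) := by
      rw [hlk, hcnt]
      have : arr.countP (fun x => decide (x ∉ ks)) = arr.countP (fun x => decide (x ≤ k)) := by
        apply List.countP_congr
        intro x hx
        simp only [decide_eq_true_eq]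
        constructor
        · intro h1
          by_cases h2 : x ∈ (k :: ks)
          · rcases List.mem_cons.mp h2 with he | hm
            · omega
            · exact absurd hm h1
          · exact le_of_lt (hcov x hx h2 k (List.mem_cons_self))
        · intro hxk hm
          exact absurd (hkts x hm) (by omega)
      rw [this, pv_le_split]
      push_cast; ring
    have hcov' : ∀ x ∈ arr, x ∉ ks → ∀ k' ∈ ks, x < k' := by
      intro x hx hnm k' hk'
      by_cases h2 : x ∈ (k :: ks)
      · rcases List.mem_cons.mp h2 with he | hm
        · subst he; exact hkts k' hk'
        · exact absurd hm hnm
      · exact hcov x hx h2 k' (List.mem_cons.mpr (Or.inr hk'))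
    -- condition ↔ balance at k
    have hc : less = (arr.length : Int) - less - cnt.getD k 0 ↔ pvBal arr k = true := by
      rw [hlk, hcnt, pvBal]
      have ht := pv_tricho arr k
      simp only [decide_eq_true_eq]
      omega
    simp only [List.foldl_cons]
    by_cases hcnd : less = (arr.length : Int) - less - cnt.getD k 0
    · rw [if_pos hcnd, ih (PySem.Set.add ok k) (less + cnt.getD k 0) hpw' hcov' hlc]
      have hb : pvBal arr k = true := hc.mp hcnd
      simp only [PySem.Set.mem_add, List.mem_cons]
      constructor
      · rintro ((h | rfl) | ⟨h1, h2⟩)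
        · exact Or.inl h
        · exact Or.inr ⟨Or.inl rfl, hb⟩
        · exact Or.inr ⟨Or.inr h1, h2⟩
      · rintro (h | ⟨(rfl | h1), h2⟩)
        · exact Or.inl (Or.inl h)
        · exact Or.inl (Or.inr rfl)
        · exact Or.inr ⟨h1, h2⟩
    · rw [if_neg hcnd, ih ok (less + cnt.getD k 0) hpw' hcov' hlc]
      have hb : ¬ pvBal arr k = true := fun h => hcnd (hc.mpr h)
      simp only [List.mem_cons]
      constructor
      · rintro (h | ⟨h1, h2⟩)
        · exact Or.inl h
        · exact Or.inr ⟨Or.inr h1, h2⟩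
      · rintro (h | ⟨(rfl | h1), h2⟩)
        · exact Or.inl h
        · exact absurd h2 hb
        · exact Or.inr ⟨h1, h2⟩

theorem medBScan_eq (arr : List Int) (ok : PySem.Set Int)
    (hok : ∀ v, v ∈ ok ↔ v ∈ arr ∧ pvBal arr v = true) :
    ∀ l : List Int, (∀ v ∈ l, v ∈ arr) → medBScan ok l = l.find? (pvBal arr) := by
  intro l
  induction l with
  | nil => intro _; rfl
  | cons v vs ih =>
    intro hsub
    have hv : v ∈ arr := hsub v List.mem_cons_self
    simp only [medBScan, List.find?_cons]
    by_cases hb : pvBal arr v = true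
    · have hc : PySem.Set.contains ok v = true := by
        rw [PySem.Set.contains_iff, hok]; exact ⟨hv, hb⟩
      rw [if_pos hc, hb]
    · have hc : ¬ PySem.Set.contains ok v = true := by
        rw [PySem.Set.contains_iff, hok]; tauto
      rw [if_neg hc, Bool.not_eq_true _ |>.mp hb]
      exact ih (fun x hx => hsub x (List.mem_cons.mpr (Or.inr hx)))

theorem B_char (arr : List Int) : med_arr_alt arr = arr.find? (pvBal arr) := by
  simp only [med_arr_alt]
  have hcnt : ∀ k, (arr.foldl (fun d v => d.insert v (d.getD v 0 + 1)) PySem.Dict.empty).getD k 0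
      = (arr.count k : Int) := by
    intro k
    rw [PySem.Dict.getD_foldl_insert_add_one]
    simp
  have hmemk : ∀ x, x ∈ PySem.List.sorted (PySem.Set.ofList arr) (fun x => x) false ↔ x ∈ arr := by
    intro x
    rw [PySem.List.mem_sorted, PySem.Set.mem_ofList]
  apply medBScan_eq
  · intro v
    rw [ok_fold arr _ hcnt _ PySem.Set.empty 0
      (PySem.List.sorted_ofList_pairwise_lt arr)
      (fun x hx hnm k hk => absurd ((hmemk x).mpr hx) hnm)
      (by
        have : arr.countP (fun x => decide (x ∉ PySem.List.sorted (PySem.Set.ofList arr) (fun x => x) false)) = 0 := by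
          rw [List.countP_eq_zero]
          intro x hx
          simp [hmemk x, hx]
        rw [this]; rfl)]
    simp only [hmemk]
    constructor
    · rintro (h | h)
      · exact absurd h (by simp [PySem.Set.empty])
      · exact h
    · exact Or.inr
  · exact fun v hv => hv

theorem med_arr_unchanged (arr : List Int) (hD : ¬ D_med_arr arr) :
    med_arr arr = med_arr_alt arr := by
  rw [A_char, B_char]
  by_cases harr : arr = []
  · subst harr; rfl
  · rw [← List.dropLast_append_getLast harr, List.find?_append, List.dropLast_append_getLast harr]
    cases hf : (arr.dropLast).find? (pvBal arr) with
    | some y => rfl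
    | none =>
      simp only [Option.none_or, List.find?]
      have hall : ∀ v ∈ arr.dropLast, pvBal arr v = false :=
        fun v hv => Bool.not_eq_true _ |>.mp (List.find?_eq_none.mp hf v hv)
      have hlast : (arr.getLast?).getD 0 = arr.getLast harr := by
        rw [List.getLast?_eq_some_getLast harr]; rfl
      have hbl : pvBal arr (arr.getLast harr) = false := by
        by_contra hb
        exact hD ⟨harr, hall, by rw [hlast]; exact Bool.not_eq_false _ |>.mp hb⟩
      rw [hbl]

-- ===== VERDICT (by name: the statement is the Claim_ definition above) =====
theorem med_arr_spec : Claim_unchanged_med_arr := by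
  intro arr _ hD
  exact med_arr_unchanged arr hD

theorem med_arr_changed : Claim_changed_med_arr := by
  unfold Claim_changed_med_arr; decide

theorem med_arr_tight : Claim_exact_med_arr := by
  intro arr _ hD
  obtain ⟨harr, hall, hbl⟩ := hD
  rw [A_char, B_char]
  have hA : (arr.dropLast).find? (pvBal arr) = none :=
    List.find?_eq_none.mpr (fun v hv => by rw [hall v hv]; exact Bool.false_ne_true)
  have hx : pvBal arr (arr.getLast harr) = true := by
    rwa [List.getLast?_eq_some_getLast harr] at hbl
  rw [hA, ← List.dropLast_append_getLast harr, List.find?_append,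
    List.dropLast_append_getLast harr, hA]
  simp only [Option.none_or, List.find?, hx]
  exact (Option.some_ne_none _).symm
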